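-- pv_equiv track=rewrite | github.com/o9nn/cosysoc | src/models/projective_geometry.py | simplex_elements
-- ===== SOURCE A (Python) =====
-- from typing import List, Tuple, Dict, Set, Optional, Generator
-- import math
--
-- def simplex_elements(dim: int) -> Dict[str, int]:
--     """
--     Return the count of k-dimensional elements in an n-simplex.
--
--     For an n-simplex:
--     - vertices (0-dim): C(n+1, 1) = n+1
--     - edges (1-dim): C(n+1, 2)
--     - faces (2-dim): C(n+1, 3)
--     - cells (3-dim): C(n+1, 4)
--     - etc.
--     """
--     if dim < 0:
--         return {"void": 1}
--
--     elements = {}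
--     names = ["vertices", "edges", "faces", "cells", "hypercells", "5-faces"]
--
--     for k in range(dim + 1):
--         count = math.comb(dim + 1, k + 1)
--         name = names[k] if k < len(names) else f"{k}-elements"
--         elements[name] = count
--
--     return elements
-- ===== SOURCE B (Python) =====
-- def _binomial_row(n):
--     """C(n,1), C(n,2), ..., C(n,n), each derived from the previous one."""
--     cs = []
--     c = 1
--     for j in range(1, n + 1):
--         c = c * (n - j + 1) // j
--         cs.append(c)
--     return cs
--
-- def simplex_elements(dim: int) -> dict:
--     """Two staged passes: build the whole binomial row incrementally,
--     then label its entries."""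
--     if dim < 0:
--         return {"void": 1}
--     names = ["vertices", "edges", "faces", "cells", "hypercells", "5-faces"]
--     elements = {}
--     k = 0
--     for count in _binomial_row(dim + 1):
--         elements[names[k] if k < len(names) else f"{k}-elements"] = count
--         k += 1
--     return elements
-- ===== Notes on version B (the rewrite author's own statement) =====
-- stated objective: faster
-- what changed: B first builds the entire binomial row C(n,1..n) in one incremental pass (each coefficient derived from the previous by c = c*(n-j+1)//j) and then labels the row in a second pass, instead of A's single loop that calls math.comb afresh for every k.
import Mathlib
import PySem

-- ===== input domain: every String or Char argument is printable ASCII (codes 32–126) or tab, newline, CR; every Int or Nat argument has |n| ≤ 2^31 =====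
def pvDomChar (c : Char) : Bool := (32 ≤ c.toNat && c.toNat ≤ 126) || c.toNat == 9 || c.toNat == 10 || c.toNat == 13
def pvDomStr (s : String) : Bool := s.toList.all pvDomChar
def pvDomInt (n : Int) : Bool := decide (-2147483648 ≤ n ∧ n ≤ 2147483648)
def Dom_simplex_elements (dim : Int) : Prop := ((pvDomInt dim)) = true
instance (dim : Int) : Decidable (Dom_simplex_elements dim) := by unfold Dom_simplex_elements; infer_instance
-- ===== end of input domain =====

-- B builds the whole binomial row C(n,1..n) incrementally in a first pass and labels it
-- in a second pass, instead of A's single loop calling math.comb afresh for every k.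

-- ===== PORT A =====
-- the name chosen for dimension k (same literal expression in both Pythons)
def pvName (k : Int) : String :=
  if k < 6 then
    PySem.List.pyGetD ["vertices", "edges", "faces", "cells", "hypercells", "5-faces"] k ""
  else PySem.Int.toStr k ++ "-elements"

-- math.comb(n, k) for the nonnegative arguments A feeds it
def pvComb (n k : Int) : Int := (n.toNat.choose k.toNat : Int)

def simplex_elements (dim : Int) : List (String × Int) :=
  if dim < 0 then [("void", 1)]
  else
    ((PySem.List.pyRange 0 (dim + 1) 1).foldl
      (fun (elements : PySem.Dict String Int) k =>
        elements.insert (pvName k) (pvComb (dim + 1) (k + 1)))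
      PySem.Dict.empty).items

-- ===== PORT B =====
-- pass 1: the row C(n,1), ..., C(n,n), each entry derived from the previous one
def pvBinomialRow (n : Int) : List Int :=
  ((PySem.List.pyRange 1 (n + 1) 1).foldl
    (fun (st : List Int × Int) j =>
      let c := PySem.Int.floordiv (st.2 * (n - j + 1)) j
      (st.1 ++ [c], c))
    ([], 1)).1

-- pass 2: label the row entries with a running counter k
def simplex_elements_alt (dim : Int) : List (String × Int) :=
  if dim < 0 then [("void", 1)]
  else
    (((pvBinomialRow (dim + 1)).foldl
      (fun (st : PySem.Dict String Int × Int) count =>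
        (st.1.insert (pvName st.2) count, st.2 + 1))
      (PySem.Dict.empty, 0)).1).items

-- ===== PRECONDITION & SPEC =====
def Spec_simplex_elements (dim : Int) (out : List (String × Int)) : Prop := out = simplex_elements_alt dim
instance (dim : Int) (out : List (String × Int)) : Decidable (Spec_simplex_elements dim out) := by unfold Spec_simplex_elements; infer_instance

-- ===== CLAIM (what is proved, stated in full; the proofs are below) =====
def Claim_equal_simplex_elements : Prop := ∀ (dim : Int), Dom_simplex_elements dim → Spec_simplex_elements dim (simplex_elements dim)

-- ===== LEMMAS AND PROOFS =====

-- the multiplicative step: from C(n, j-1) the row pass computes C(n, j)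
lemma pvStep (n j : Int) (h1 : 1 ≤ j) (h2 : j ≤ n) :
    PySem.Int.floordiv (pvComb n (j - 1) * (n - j + 1)) j = pvComb n j := by
  obtain ⟨m, hm⟩ : ∃ m : Nat, n = (m : Int) := ⟨n.toNat, by omega⟩
  obtain ⟨i, hi⟩ : ∃ i : Nat, j = (i : Int) + 1 := ⟨(j - 1).toNat, by omega⟩
  have him : i + 1 ≤ m := by omega
  have hc : (m.choose (i + 1) * (i + 1) : Nat) = m.choose i * (m - i) :=
    Nat.choose_succ_right_eq m i
  have hnum : pvComb n (j - 1) * (n - j + 1) = ((m.choose (i + 1) * (i + 1) : Nat) : Int) := by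
    simp only [pvComb, hm, hi]
    have e1 : ((i : Int) + 1 - 1).toNat = i := by omega
    have e2 : (m : Int) - ((i : Int) + 1) + 1 = ((m - i : Nat) : Int) := by omega
    rw [Int.toNat_natCast, e1, e2, hc]
    push_cast
    ring
  have hrhs : pvComb n j = ((m.choose (i + 1) : Nat) : Int) := by
    simp only [pvComb, hm, hi]
    have e : ((i : Int) + 1).toNat = i + 1 := by omega
    rw [Int.toNat_natCast, e]
  have hj : j = ((i + 1 : Nat) : Int) := by omega
  rw [hnum, hrhs, hj, PySem.Int.floordiv_eq_ediv_of_pos (by positivity)]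
  push_cast
  rw [Int.mul_ediv_cancel _ (by positivity)]

-- pass-1 invariant: carrying c = C(n, a-1), the row pass appends C(n,a), ..., C(n,n)
lemma pvRowLoop (n : Int) : ∀ (m : Nat) (a : Int) (acc : List Int) (c : Int),
    1 ≤ a → a + (m : Int) = n + 1 → c = pvComb n (a - 1) →
    ((PySem.List.pyRange a (n + 1) 1).foldl
      (fun (st : List Int × Int) j =>
        let c := PySem.Int.floordiv (st.2 * (n - j + 1)) j
        (st.1 ++ [c], c))
      (acc, c)).1 = acc ++ (PySem.List.pyRange a (n + 1) 1).map (pvComb n) := by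
  intro m
  induction m with
  | zero =>
    intro a acc c h1 hm hc
    rw [PySem.List.pyRange_one_eq_nil (by omega)]
    simp
  | succ m ih =>
    intro a acc c h1 hm hc
    rw [PySem.List.pyRange_one_cons (by omega)]
    simp only [List.foldl_cons, List.map_cons]
    rw [hc, pvStep n a h1 (by omega),
        ih (a + 1) (acc ++ [pvComb n a]) (pvComb n a) (by omega) (by omega) (by ring_nf),
        List.append_assoc]
    rfl

-- pass-2 vs A's loop: folding B's labelling step over the mapped range with counter a
-- builds exactly the dict A's single loop builds from position a on
lemma pvZipLoop (dim : Int) : ∀ (m : Nat) (a : Int) (d : PySem.Dict String Int),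
    0 ≤ a → a + (m : Int) = dim + 1 →
    (((PySem.List.pyRange (a + 1) (dim + 2) 1).map (pvComb (dim + 1))).foldl
      (fun (st : PySem.Dict String Int × Int) count =>
        (st.1.insert (pvName st.2) count, st.2 + 1))
      (d, a)).1
    = (PySem.List.pyRange a (dim + 1) 1).foldl
        (fun (elements : PySem.Dict String Int) k =>
          elements.insert (pvName k) (pvComb (dim + 1) (k + 1))) d := by
  intro m
  induction m with
  | zero =>
    intro a d h0 hm
    rw [PySem.List.pyRange_one_eq_nil (show (dim + 1 : Int) ≤ a by omega),
        PySem.List.pyRange_one_eq_nil (show (dim + 2 : Int) ≤ a + 1 by omega)]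
    simp
  | succ m ih =>
    intro a d h0 hm
    rw [PySem.List.pyRange_one_cons (show a < dim + 1 by omega),
        PySem.List.pyRange_one_cons (show a + 1 < dim + 2 by omega)]
    simp only [List.map_cons, List.foldl_cons]
    rw [show a + 1 + 1 = (a + 1) + 1 by ring]
    exact ih (a + 1) _ (by omega) (by omega)

-- ===== VERDICT (by name: the statement is the Claim_ definition above) =====
theorem simplex_elements_spec : Claim_equal_simplex_elements := by
  intro dim _
  unfold Spec_simplex_elements simplex_elements simplex_elements_alt pvBinomialRow
  split
  · rfl
  · rename_i h
    have hd : 0 ≤ dim := by omega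
    rw [pvRowLoop (dim + 1) (dim + 1).toNat 1 [] 1 le_rfl (by omega)
          (by simp [pvComb]),
        List.nil_append, show dim + 1 + 1 = dim + 2 by ring]
    have hz := pvZipLoop dim (dim + 1).toNat 0 PySem.Dict.empty le_rfl (by omega)
    rw [show (0 : Int) + 1 = 1 by ring] at hz
    rw [hz]
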